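-- pv_equiv track=rewrite | github.com/rohitbishoyi10/Leetcode_dsa | mov_negative_to_left_newarr.py | move_array_left
-- ===== SOURCE A (Python) =====
-- def move_array_left(arr):
--     na = []
--     a = 0
--     for i in arr:
--         if i <0:
--             na.insert(a,i)
--             a+=1
--         else:
--             na.append(i)
--     return na
-- ===== SOURCE B (Python) =====
-- def move_array_left(arr):
--     return [x for x in arr if x < 0] + [x for x in arr if x >= 0]
-- ===== Notes on version B (the rewrite author's own statement) =====
-- stated objective: simpler
-- what changed: Replaces the manual scan that maintains an insertion cursor and inserts each negative mid-list with two comprehensions: the negatives filtered out, then the non-negatives, concatenated.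
import Mathlib
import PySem

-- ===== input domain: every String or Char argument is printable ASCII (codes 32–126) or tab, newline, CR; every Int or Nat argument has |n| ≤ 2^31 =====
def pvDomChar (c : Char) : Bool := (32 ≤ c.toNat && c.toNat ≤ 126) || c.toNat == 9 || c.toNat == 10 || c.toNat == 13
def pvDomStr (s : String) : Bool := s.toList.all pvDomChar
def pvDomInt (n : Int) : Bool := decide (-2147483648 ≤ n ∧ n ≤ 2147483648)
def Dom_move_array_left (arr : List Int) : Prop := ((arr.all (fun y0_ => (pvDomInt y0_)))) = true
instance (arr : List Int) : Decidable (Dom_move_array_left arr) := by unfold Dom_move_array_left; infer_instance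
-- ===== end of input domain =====

-- ===== PORT A =====
-- A scans the list, inserting each negative at a running cursor `a` and appending non-negatives.
def move_array_left (arr : List Int) : List Int :=
  (arr.foldl
    (fun (s : List Int × Int) (i : Int) =>
      if i < 0 then (PySem.List.insert s.1 s.2 i, s.2 + 1) else (s.1 ++ [i], s.2))
    (([] : List Int), (0 : Int))).1

-- ===== PORT B =====
-- B (simpler): the negatives in order, then the non-negatives in order, via two filters.
def move_array_left_alt (arr : List Int) : List Int :=
  arr.filter (fun x => decide (x < 0)) ++ arr.filter (fun x => decide (x ≥ 0))

-- ===== PRECONDITION & SPEC =====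
def Spec_move_array_left (arr : List Int) (out : List Int) : Prop := out = move_array_left_alt arr
instance (arr : List Int) (out : List Int) : Decidable (Spec_move_array_left arr out) := by unfold Spec_move_array_left; infer_instance

-- ===== CLAIM (what is proved, stated in full; the proofs are below) =====
def Claim_equal_move_array_left : Prop := ∀ (arr : List Int), Dom_move_array_left arr → Spec_move_array_left arr (move_array_left arr)

-- ===== LEMMAS AND PROOFS =====

-- Loop invariant: starting from the accumulator `negs ++ nons` with cursor `negs.length`,
-- the fold produces the starting negatives, then the remaining negatives, then the starting
-- non-negative tail, then the remaining non-negatives.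
theorem move_array_left_loop_inv (arr negs nons : List Int) :
    (arr.foldl
      (fun (s : List Int × Int) (i : Int) =>
        if i < 0 then (PySem.List.insert s.1 s.2 i, s.2 + 1) else (s.1 ++ [i], s.2))
      (negs ++ nons, (negs.length : Int))).1
    = negs ++ arr.filter (fun x => decide (x < 0)) ++ nons ++ arr.filter (fun x => decide (x ≥ 0)) := by
  induction arr generalizing negs nons with
  | nil => simp
  | cons i rest ih =>
    by_cases hi : i < 0
    · have hins : PySem.List.insert (negs ++ nons) (negs.length : Int) i
          = (negs ++ [i]) ++ nons := by
        rw [PySem.List.insert_natCast (negs ++ nons) negs.length i (by simp)]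
        simp
      have hlen : ((negs.length : Int) + 1) = (((negs ++ [i]).length : Nat) : Int) := by
        simp
      simp only [List.foldl_cons, if_pos hi, hins, hlen]
      rw [ih (negs ++ [i]) nons]
      simp [hi, not_le.mpr hi]
    · have happ : (negs ++ nons) ++ [i] = negs ++ (nons ++ [i]) := by simp
      simp only [List.foldl_cons, if_neg hi, happ]
      rw [ih negs (nons ++ [i])]
      simp [hi, le_of_not_gt hi]

-- ===== VERDICT (by name: the statement is the Claim_ definition above) =====
theorem move_array_left_spec : Claim_equal_move_array_left := by
  intro arr _
  unfold Spec_move_array_left move_array_left move_array_left_alt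
  have h := move_array_left_loop_inv arr [] []
  simpa using h
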